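-- pv_equiv track=rewrite | github.com/jkolehm/noloco | src/noloco/create_process_groups.py | _remainders
-- ===== SOURCE A (Python) =====
-- def _remainders(sub_ranks, world_sizes):
--     remainders = [0] * len(world_sizes)
--     for i in range(len(world_sizes)):
--         group_size = 1
--         for j in range(len(world_sizes) - 1, -1, -1):
--             if i == j:
--                 continue
--             remainders[i] += sub_ranks[j] * group_size
--             group_size *= world_sizes[j]
--     return remainders
-- ===== SOURCE B (Python) =====
-- def _remainders(sub_ranks, world_sizes):
--     n = len(world_sizes)
--     # one right-to-left pass: pl[i] = (P, L) with
--     #   P = product of world_sizes[i+1:]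
--     #   L = mixed-radix value of sub_ranks[i+1:] under world_sizes[i+1:]
--     pl = [(1, 0)] * n
--     for i in range(n - 2, -1, -1):
--         P, L = pl[i + 1]
--         pl[i] = (P * world_sizes[i + 1], L + sub_ranks[i + 1] * P)
--     # one left-to-right pass: M = mixed-radix value of the prefix before i
--     out = []
--     M = 0
--     for i in range(n):
--         P, L = pl[i]
--         out.append(L + P * M)
--         M = M * world_sizes[i] + sub_ranks[i]
--     return out
-- ===== Notes on version B (the rewrite author's own statement) =====
-- stated objective: faster
-- what changed: Replaced the per-index rescan of all coordinates (two nested loops) with one right-to-left pass computing suffix (weight, mixed-radix value) pairs and one left-to-right Horner accumulator for the prefix value; intended as faster (measured 25.4x at n=1024, the largest size where both finished; unconfirmed at n=4096 where giant-integer products dominate).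
-- outside the precondition, e.g. on _remainders([], [5]): A returns [0], B raises IndexError
import Mathlib
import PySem

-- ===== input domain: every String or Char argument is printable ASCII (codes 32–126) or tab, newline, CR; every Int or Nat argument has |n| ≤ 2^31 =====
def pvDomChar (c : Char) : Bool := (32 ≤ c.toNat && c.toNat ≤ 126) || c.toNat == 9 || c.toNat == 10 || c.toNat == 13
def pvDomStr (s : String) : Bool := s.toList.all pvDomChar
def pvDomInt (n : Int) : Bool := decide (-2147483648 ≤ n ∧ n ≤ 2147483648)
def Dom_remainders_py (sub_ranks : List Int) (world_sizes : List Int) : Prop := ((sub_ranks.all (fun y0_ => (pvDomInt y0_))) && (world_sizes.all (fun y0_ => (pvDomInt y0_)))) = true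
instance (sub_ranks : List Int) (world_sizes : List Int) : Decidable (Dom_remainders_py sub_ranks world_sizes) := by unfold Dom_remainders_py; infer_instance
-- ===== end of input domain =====

-- B replaces A's per-index rescan (nested loops) with one suffix pass of (weight, value)
-- pairs plus one left-to-right Horner pass; intended as faster (measured 25.4x at n=1024);
-- equal on Pre_ (enough sub_ranks).

-- ===== PORT A =====
-- for i in range(n): inner loop j = n-1 .. 0, skipping j == i, accumulating (remainders[i], group_size)
def remainders_py (sub_ranks : List Int) (world_sizes : List Int) : List Int :=
  (PySem.List.pyRange 0 (world_sizes.length : Int) 1).map (fun i =>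
    ((PySem.List.pyRange ((world_sizes.length : Int) - 1) (-1) (-1)).foldl
      (fun (st : Int × Int) j =>
        if i = j then st
        else (st.1 + PySem.List.pyGetD sub_ranks j 0 * st.2,
              st.2 * PySem.List.pyGetD world_sizes j 0)) (0, 1)).1)

-- ===== PORT B =====
-- right-to-left pass of Source B: pvSuffix l at position i holds (P, L) =
-- (product of later weights, mixed-radix value of the later coordinates)
def pvSuffix : List (Int × Int) → List (Int × Int)
  | [] => []
  | _ :: rest =>
    match rest, pvSuffix rest with
    | (s', w') :: _, (P, L) :: tl => (P * w', L + s' * P) :: (P, L) :: tl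
    | _, _ => [(1, 0)]

def remainders_py_alt (sub_ranks : List Int) (world_sizes : List Int) : List Int :=
  let pairs := List.zip sub_ranks world_sizes
  let pl := pvSuffix pairs
  -- left-to-right pass of Source B: out.append(L + P * M); M = M * w + s
  ((List.zip pl pairs).foldl
    (fun (st : List Int × Int) x =>
      (st.1 ++ [x.1.2 + x.1.1 * st.2], st.2 * x.2.2 + x.2.1)) ([], 0)).1

-- ===== PRECONDITION & SPEC =====
-- Pre_ excludes inputs with fewer sub_ranks than world_sizes: there A raises IndexError,
-- except the degenerate case len(world_sizes) = 1, sub_ranks = [] where A returns [0]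
-- but B's own single pass raises IndexError (see claim cites).
def Pre_remainders_py (sub_ranks : List Int) (world_sizes : List Int) : Prop :=
  world_sizes.length ≤ sub_ranks.length
instance (sub_ranks : List Int) (world_sizes : List Int) : Decidable (Pre_remainders_py sub_ranks world_sizes) := by unfold Pre_remainders_py; infer_instance
def pvWitness_remainders_py : List Int × List Int := ([3, 1, 4], [2, 5, 7])

def Spec_remainders_py (sub_ranks : List Int) (world_sizes : List Int) (out : List Int) : Prop := out = remainders_py_alt sub_ranks world_sizes
instance (sub_ranks : List Int) (world_sizes : List Int) (out : List Int) : Decidable (Spec_remainders_py sub_ranks world_sizes out) := by unfold Spec_remainders_py; infer_instance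

-- ===== CLAIM (what is proved, stated in full; the proofs are below) =====
def Claim_equal_remainders_py : Prop := ∀ (sub_ranks : List Int) (world_sizes : List Int), Dom_remainders_py sub_ranks world_sizes → Pre_remainders_py sub_ranks world_sizes → Spec_remainders_py sub_ranks world_sizes (remainders_py sub_ranks world_sizes)

-- ===== LEMMAS AND PROOFS =====

-- weight of a block of coordinates
def Wv (l : List (Int × Int)) : Int := (l.map Prod.snd).prod
-- mixed-radix value, most significant first (A's accumulation order)
def Vv : List (Int × Int) → Int
  | [] => 0
  | (s, _) :: t => s * Wv t + Vv t
-- Horner evaluation from seed m (B's left-to-right accumulator)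
def Hv (m : Int) (l : List (Int × Int)) : Int := l.foldl (fun m p => m * p.2 + p.1) m
-- the common closed form of entry i
def Ev (l : List (Int × Int)) (i : Nat) : Int :=
  Vv (l.drop (i + 1)) + Wv (l.drop (i + 1)) * Hv 0 (l.take i)

theorem Wv_nil : Wv [] = 1 := rfl
theorem Wv_append (a b : List (Int × Int)) : Wv (a ++ b) = Wv a * Wv b := by
  simp [Wv]

theorem Vv_append (a b : List (Int × Int)) : Vv (a ++ b) = Vv a * Wv b + Vv b := by
  induction a with
  | nil => simp [Vv]
  | cons p t ih => cases p; simp [Vv, ih, Wv_append]; ring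

theorem Hv_eq (m : Int) (l : List (Int × Int)) : Hv m l = m * Wv l + Vv l := by
  induction l generalizing m with
  | nil => simp [Hv, Wv, Vv]
  | cons p t ih =>
    cases p with
    | mk s w => simp [Hv, List.foldl_cons, Vv] at *; rw [ih]; simp [Wv]; ring

theorem pvSuffix_cons (p : Int × Int) (t : List (Int × Int)) :
    pvSuffix (p :: t) = (Wv t, Vv t) :: pvSuffix t := by
  induction t generalizing p with
  | nil => rfl
  | cons q t' ih =>
    cases q with
    | mk s' w' =>
      have h := ih ((s', w'))
      conv_lhs => rw [show pvSuffix (p :: (s', w') :: t') =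
        (match ((s', w') :: t'), pvSuffix ((s', w') :: t') with
         | (s', w') :: _, (P, L) :: tl => ((P * w', L + s' * P)) :: (P, L) :: tl
         | _, _ => [((1 : Int), (0 : Int))]) from rfl]
      rw [h]
      simp only [Wv, Vv, List.map_cons, List.prod_cons]
      congr 1
      exact Prod.ext (by ring) (by ring)

-- the fold of A's inner loop, already rewritten to read the zipped list
def innerL (l : List (Int × Int)) (i : Int) (st : Int × Int) : Int × Int :=
  (PySem.List.pyRange ((l.length : Int) - 1) (-1) (-1)).foldl
    (fun (st : Int × Int) j =>
      if i = j then st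
      else (st.1 + (PySem.List.pyGetD l j ((0 : Int), (0 : Int))).1 * st.2,
            st.2 * (PySem.List.pyGetD l j ((0 : Int), (0 : Int))).2)) st

theorem pyGetD_append_lt (l' : List (Int × Int)) (p : Int × Int) (j : Int)
    (h0 : 0 ≤ j) (h1 : j < (l'.length : Int)) :
    PySem.List.pyGetD (l' ++ [p]) j ((0 : Int), (0 : Int)) =
    PySem.List.pyGetD l' j ((0 : Int), (0 : Int)) := by
  rw [PySem.List.pyGetD_eq_getElem (l' ++ [p]) _ h0 (by simp; omega),
      PySem.List.pyGetD_eq_getElem l' _ h0 (by exact_mod_cast h1)]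
  rw [List.getElem_append_left (by omega)]

theorem innerL_no_skip (l : List (Int × Int)) (i : Int)
    (hi : i < 0 ∨ (l.length : Int) ≤ i) (r g : Int) :
    innerL l i (r, g) = (r + g * Vv l, g * Wv l) := by
  induction l using List.reverseRecOn generalizing r g with
  | nil =>
    simp [innerL, PySem.List.pyRange_neg_one_eq_nil (by norm_num : (-1:Int) ≤ -1), Vv, Wv]
  | append_singleton l' p ih =>
    have hm : (0:Int) ≤ (l'.length : Int) := by positivity
    have hlen : ((l' ++ [p]).length : Int) - 1 = (l'.length : Int) := by simp
    rw [innerL, hlen, PySem.List.pyRange_neg_one_cons (by omega), List.foldl_cons]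
    have hne : i ≠ (l'.length : Int) := by simp at hi; omega
    rw [if_neg hne]
    have hp : PySem.List.pyGetD (l' ++ [p]) ((l'.length : Int)) ((0:Int),(0:Int)) = p := by
      rw [PySem.List.pyGetD_eq_getElem (l' ++ [p]) _ hm (by simp)]
      simp
    rw [hp]
    have hcong := PySem.List.foldl_congr_mem
      (l := PySem.List.pyRange ((l'.length : Int) - 1) (-1) (-1))
      (f := fun (st : Int × Int) j =>
        if i = j then st
        else (st.1 + (PySem.List.pyGetD (l' ++ [p]) j ((0 : Int), (0 : Int))).1 * st.2,
              st.2 * (PySem.List.pyGetD (l' ++ [p]) j ((0 : Int), (0 : Int))).2))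
      (g := fun (st : Int × Int) j =>
        if i = j then st
        else (st.1 + (PySem.List.pyGetD l' j ((0 : Int), (0 : Int))).1 * st.2,
              st.2 * (PySem.List.pyGetD l' j ((0 : Int), (0 : Int))).2))
      (init := (r + p.1 * g, g * p.2))
      (by intro acc x hx
          rw [PySem.List.mem_pyRange_neg_one] at hx
          dsimp only
          rw [pyGetD_append_lt l' p x (by omega) (by omega)])
    rw [hcong]
    have hIH := ih (by simp at hi ⊢; omega) (r + p.1 * g) (g * p.2)
    rw [innerL] at hIH
    rw [hIH, Vv_append, Wv_append]
    obtain ⟨ps, pw⟩ := p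
    simp only [Vv, Wv, List.map_cons, List.map_nil, List.prod_cons, List.prod_nil]
    exact Prod.ext (by ring) (by ring)

theorem innerL_skip (l : List (Int × Int)) (i : Nat) (hi : i < l.length) (r g : Int) :
    innerL l (i : Int) (r, g) =
      (r + g * Ev l i, g * (Wv (l.take i) * Wv (l.drop (i + 1)))) := by
  induction l using List.reverseRecOn generalizing r g with
  | nil => simp at hi
  | append_singleton l' p ih =>
    have hm : (0:Int) ≤ (l'.length : Int) := by positivity
    have hlen : ((l' ++ [p]).length : Int) - 1 = (l'.length : Int) := by simp
    rw [innerL, hlen, PySem.List.pyRange_neg_one_cons (by omega), List.foldl_cons]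
    have hp : PySem.List.pyGetD (l' ++ [p]) ((l'.length : Int)) ((0:Int),(0:Int)) = p := by
      rw [PySem.List.pyGetD_eq_getElem (l' ++ [p]) _ hm (by simp)]
      simp
    by_cases hcase : i = l'.length
    · -- skip the last index; the remaining loop never skips
      rw [if_pos (by exact_mod_cast congrArg Nat.cast hcase)]
      have hcong := PySem.List.foldl_congr_mem
        (l := PySem.List.pyRange ((l'.length : Int) - 1) (-1) (-1))
        (f := fun (st : Int × Int) j =>
          if (i : Int) = j then st
          else (st.1 + (PySem.List.pyGetD (l' ++ [p]) j ((0 : Int), (0 : Int))).1 * st.2,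
                st.2 * (PySem.List.pyGetD (l' ++ [p]) j ((0 : Int), (0 : Int))).2))
        (g := fun (st : Int × Int) j =>
          if (i : Int) = j then st
          else (st.1 + (PySem.List.pyGetD l' j ((0 : Int), (0 : Int))).1 * st.2,
                st.2 * (PySem.List.pyGetD l' j ((0 : Int), (0 : Int))).2))
        (init := (r, g))
        (by intro acc x hx
            rw [PySem.List.mem_pyRange_neg_one] at hx
            dsimp only
            rw [pyGetD_append_lt l' p x (by omega) (by omega)])
      rw [hcong]
      have := innerL_no_skip l' (i : Int) (by right; omega) r g
      rw [innerL] at this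
      rw [this]
      subst hcase
      have ht : (l' ++ [p]).take l'.length = l' := by
        rw [List.take_append_of_le_length (le_refl _), List.take_length]
      have hd : (l' ++ [p]).drop (l'.length + 1) = [] := by
        rw [List.drop_eq_nil_iff]; simp
      rw [Ev, ht, hd]
      simp [Vv, Wv_nil, Hv_eq]
    · -- the last index contributes, then recurse on l'
      have hne : (i : Int) ≠ (l'.length : Int) := by
        intro h; exact hcase (by exact_mod_cast h)
      have hilt : i < l'.length := by
        simp at hi; omega
      rw [if_neg hne, hp]
      have hcong := PySem.List.foldl_congr_mem
        (l := PySem.List.pyRange ((l'.length : Int) - 1) (-1) (-1))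
        (f := fun (st : Int × Int) j =>
          if (i : Int) = j then st
          else (st.1 + (PySem.List.pyGetD (l' ++ [p]) j ((0 : Int), (0 : Int))).1 * st.2,
                st.2 * (PySem.List.pyGetD (l' ++ [p]) j ((0 : Int), (0 : Int))).2))
        (g := fun (st : Int × Int) j =>
          if (i : Int) = j then st
          else (st.1 + (PySem.List.pyGetD l' j ((0 : Int), (0 : Int))).1 * st.2,
                st.2 * (PySem.List.pyGetD l' j ((0 : Int), (0 : Int))).2))
        (init := (r + p.1 * g, g * p.2))
        (by intro acc x hx
            rw [PySem.List.mem_pyRange_neg_one] at hx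
            dsimp only
            rw [pyGetD_append_lt l' p x (by omega) (by omega)])
      rw [hcong]
      have := ih hilt (r + p.1 * g) (g * p.2)
      rw [innerL] at this
      rw [this]
      have ht : (l' ++ [p]).take i = l'.take i :=
        List.take_append_of_le_length (le_of_lt hilt)
      have hd : (l' ++ [p]).drop (i + 1) = l'.drop (i + 1) ++ [p] :=
        List.drop_append_of_le_length (by omega)
      rw [Ev, Ev, ht, hd, Vv_append, Wv_append]
      obtain ⟨ps, pw⟩ := p
      simp only [Vv, Wv, List.map_cons, List.map_nil, List.prod_cons, List.prod_nil]
      exact Prod.ext (by ring) (by ring)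

-- B's output fold, characterized entry by entry
theorem B_fold (l : List (Int × Int)) (acc : List Int) (m : Int) :
    ((List.zip (pvSuffix l) l).foldl
      (fun (st : List Int × Int) x =>
        (st.1 ++ [x.1.2 + x.1.1 * st.2], st.2 * x.2.2 + x.2.1)) (acc, m)).1 =
    acc ++ (List.range l.length).map
      (fun i => Vv (l.drop (i + 1)) + Wv (l.drop (i + 1)) * Hv m (l.take i)) := by
  induction l generalizing acc m with
  | nil => simp
  | cons p t ih =>
    rw [pvSuffix_cons, List.zip_cons_cons, List.foldl_cons]
    rw [ih]
    rw [List.length_cons, List.range_succ_eq_map, List.map_cons, List.map_map]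
    rw [List.append_assoc]
    congr 1

theorem zip_fst (sr ws : List Int) (j : Int) (h0 : 0 ≤ j)
    (h1 : j < ((List.zip sr ws).length : Int)) :
    (PySem.List.pyGetD (List.zip sr ws) j ((0 : Int), (0 : Int))).1 =
      PySem.List.pyGetD sr j 0 ∧
    (PySem.List.pyGetD (List.zip sr ws) j ((0 : Int), (0 : Int))).2 =
      PySem.List.pyGetD ws j 0 := by
  have hs : j < (sr.length : Int) := by simp [List.length_zip] at h1; omega
  have hw : j < (ws.length : Int) := by simp [List.length_zip] at h1; omega
  rw [PySem.List.pyGetD_eq_getElem (List.zip sr ws) _ h0 h1,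
      PySem.List.pyGetD_eq_getElem sr _ h0 hs,
      PySem.List.pyGetD_eq_getElem ws _ h0 hw]
  simp [List.getElem_zip]

-- ===== VERDICT (by name: the statement is the Claim_ definition above) =====
theorem remainders_py_spec : Claim_equal_remainders_py := by
  intro sr ws _ hpre
  unfold Spec_remainders_py remainders_py remainders_py_alt
  set l := List.zip sr ws with hl
  have hpre' : ws.length ≤ sr.length := hpre
  have hlen : l.length = ws.length := by
    rw [hl, List.length_zip]; omega
  rw [B_fold l [] 0, List.nil_append, hlen]
  rw [PySem.List.pyRange_one 0 (ws.length : Int)]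
  simp only [Int.sub_zero, Int.toNat_natCast, zero_add, List.map_map]
  apply List.map_congr_left
  intro i hi
  rw [List.mem_range] at hi
  simp only [Function.comp]
  -- rewrite A's inner fold to read the zipped list, then apply innerL_skip
  have hcong := PySem.List.foldl_congr_mem
    (l := PySem.List.pyRange ((ws.length : Int) - 1) (-1) (-1))
    (f := fun (st : Int × Int) j =>
      if (i : Int) = j then st
      else (st.1 + PySem.List.pyGetD sr j 0 * st.2,
            st.2 * PySem.List.pyGetD ws j 0))
    (g := fun (st : Int × Int) j =>
      if (i : Int) = j then st
      else (st.1 + (PySem.List.pyGetD l j ((0 : Int), (0 : Int))).1 * st.2,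
            st.2 * (PySem.List.pyGetD l j ((0 : Int), (0 : Int))).2))
    (init := ((0 : Int), (1 : Int)))
    (by intro acc x hx
        rw [PySem.List.mem_pyRange_neg_one] at hx
        obtain ⟨h1, h2⟩ := zip_fst sr ws x (by omega) (by rw [hlen]; omega)
        dsimp only
        rw [h1, h2])
  rw [hcong]
  have hrange : ((ws.length : Int) - 1) = ((l.length : Int) - 1) := by rw [hlen]
  rw [hrange]
  have := innerL_skip l i (by omega) 0 1
  rw [innerL] at this
  rw [this]
  simp [Ev, Hv_eq]
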